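-- pv_equiv track=rewrite | github.com/itsshivampal/Concept-Prerequiste-Learning | Proposed Method/concept_prereqs/content_processing.py | concepts_collections
-- ===== SOURCE A (Python) =====
-- import collections
--
-- def concepts_collections(concepts):
-- 	counter = collections.Counter(concepts)
-- 	concept_list = list(counter.keys())
-- 	freq_list = list(counter.values())
-- 	concept_list = "|".join(concept_list)
-- 	freq_list = [str(freq) for freq in freq_list]
-- 	freq_list = "|".join(freq_list)
-- 	return (concept_list, freq_list)
-- ===== SOURCE B (Python) =====
-- def concepts_collections(concepts):
--     # Partition-and-recurse: peel off the first concept with all its duplicates,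
--     # record it and its count, repeat on what is left. No dict/Counter at all.
--     names = []
--     counts = []
--     rest = concepts
--     while rest:
--         c = rest[0]
--         same = [x for x in rest if x == c]
--         rest = [x for x in rest if x != c]
--         names.append(c)
--         counts.append(str(len(same)))
--     return ("|".join(names), "|".join(counts))
-- ===== Notes on version B (the rewrite author's own statement) =====
-- stated objective: alternative
-- what changed: Replaces the single-pass Counter accumulation with a partition-and-recurse sweep: repeatedly peel the first remaining concept and all its duplicates off the list, recording its name and count, until the list is empty - no dictionary/counter is built at all.
import Mathlib
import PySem

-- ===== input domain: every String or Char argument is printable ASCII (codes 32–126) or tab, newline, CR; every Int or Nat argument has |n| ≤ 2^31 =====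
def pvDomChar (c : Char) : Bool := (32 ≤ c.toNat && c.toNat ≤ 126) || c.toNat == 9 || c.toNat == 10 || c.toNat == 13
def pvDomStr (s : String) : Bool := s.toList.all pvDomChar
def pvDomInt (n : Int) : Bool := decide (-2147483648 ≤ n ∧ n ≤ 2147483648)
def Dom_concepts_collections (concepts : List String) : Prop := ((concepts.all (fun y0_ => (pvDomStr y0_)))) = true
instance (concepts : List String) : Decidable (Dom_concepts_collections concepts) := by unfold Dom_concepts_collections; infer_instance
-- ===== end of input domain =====

-- B replaces A's single-pass Counter with a partition-and-recurse sweep: peel off the first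
-- concept together with all its duplicates, record its name and count, repeat on the remainder;
-- no dict at all — an alternative decomposition, same return value.



-- ===== PORT A =====
def concepts_collections (concepts : List String) : String × String :=
  let counter := PySem.Dict.counter concepts
  let concept_list := counter.keys
  let freq_list := counter.values
  let concept_list' := PySem.Str.join "|" concept_list
  let freq_list' := freq_list.map (fun freq => PySem.Int.toStr freq)
  let freq_list'' := PySem.Str.join "|" freq_list'
  (concept_list', freq_list'')

-- ===== PORT B =====
-- the while loop of Source B: take rest[0], split rest into its duplicates and the others,
-- record (name, str(count)) and continue on the others
def ccGo : List String → List String × List String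
  | [] => ([], [])
  | c :: t =>
    let same := (c :: t).filter (fun x => x == c)
    let rest := (c :: t).filter (fun x => x != c)
    let p := ccGo rest
    (c :: p.1, PySem.Int.toStr (same.length : Int) :: p.2)
termination_by xs => xs.length
decreasing_by
  have h := List.length_filter_le (fun x => x != c) t
  simp
  all_goals omega

def concepts_collections_alt (concepts : List String) : String × String :=
  let p := ccGo concepts
  (PySem.Str.join "|" p.1, PySem.Str.join "|" p.2)

-- ===== PRECONDITION & SPEC =====
def Spec_concepts_collections (concepts : List String) (out : String × String) : Prop := out = concepts_collections_alt concepts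
instance (concepts : List String) (out : String × String) : Decidable (Spec_concepts_collections concepts out) := by unfold Spec_concepts_collections; infer_instance

-- ===== CLAIM (what is proved, stated in full; the proofs are below) =====
def Claim_equal_concepts_collections : Prop := ∀ (concepts : List String), Dom_concepts_collections concepts → Spec_concepts_collections concepts (concepts_collections concepts)

-- ===== LEMMAS AND PROOFS =====
theorem counter_values_eq (xs : List String) :
    (PySem.Dict.counter xs).values = (PySem.Set.ofList xs).map (fun k => (xs.count k : Int)) := by
  have h := PySem.Dict.items_counter (xs := xs)
  have hv : (PySem.Dict.counter xs).values = (PySem.Dict.counter xs).items.map Prod.snd := rfl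
  rw [hv, h, List.map_map]
  rfl

theorem filter_ne_comm (x c : String) (l : List String) :
    (l.filter (fun y => y != c)).filter (fun y => y != x)
      = (l.filter (fun y => y != x)).filter (fun y => y != c) := by
  rw [List.filter_filter, List.filter_filter]; congr 1; funext y; exact Bool.and_comm _ _

theorem ofList_filter_ne (t : List String) (c : String) :
    PySem.Set.ofList (t.filter (fun y => y != c)) = PySem.Set.discard (PySem.Set.ofList t) c := by
  induction t with
  | nil => rfl
  | cons x t ih =>
    by_cases hx : x = c
    · subst hx
      rw [List.filter_cons_of_neg (by simp)]
      rw [ih]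
      show PySem.Set.discard (PySem.Set.ofList t) x = PySem.Set.discard (PySem.Set.ofList (x :: t)) x
      rw [PySem.Set.ofList_cons]
      show (PySem.Set.ofList t).filter (fun y => y != x)
        = ((x :: (PySem.Set.ofList t).filter (fun y => y != x)).filter (fun y => y != x))
      rw [List.filter_cons_of_neg (by simp), List.filter_filter]
      congr 1; funext y; exact (Bool.and_self _).symm
    · rw [List.filter_cons_of_pos (by simp [hx])]
      rw [PySem.Set.ofList_cons, PySem.Set.ofList_cons, ih]
      show x :: ((PySem.Set.ofList t).filter (fun y => y != c)).filter (fun y => y != x)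
        = (x :: (PySem.Set.ofList t).filter (fun y => y != x)).filter (fun y => y != c)
      rw [List.filter_cons_of_pos (by simp [hx]), filter_ne_comm]

theorem ccGo_eq (xs : List String) :
    ccGo xs = (PySem.Set.ofList xs,
               (PySem.Set.ofList xs).map (fun k => PySem.Int.toStr (xs.count k : Int))) := by
  induction xs using ccGo.induct with
  | case1 => simp [ccGo]
  | case2 c t rest ih =>
    have hrest : (c :: t).filter (fun x => x != c) = t.filter (fun x => x != c) := by simp
    have hr2 : rest = t.filter (fun x => x != c) := hrest
    rw [hr2] at ih
    have hsame : ((c :: t).filter (fun x => x == c)).length = (c :: t).count c := by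
      simp [List.count_eq_length_filter]
    have hof : PySem.Set.ofList (c :: t) = c :: PySem.Set.ofList (t.filter (fun y => y != c)) := by
      rw [ofList_filter_ne, PySem.Set.ofList_cons]
    have hmap : (PySem.Set.ofList (t.filter (fun x => x != c))).map
          (fun k => PySem.Int.toStr ((t.filter (fun x => x != c)).count k : Int))
        = (PySem.Set.ofList (t.filter (fun x => x != c))).map
          (fun k => PySem.Int.toStr ((c :: t).count k : Int)) := by
      apply List.map_congr_left
      intro k hk
      have hkmem : k ∈ t.filter (fun x => x != c) :=
        (PySem.Set.mem_ofList (xs := t.filter (fun x => x != c)) (y := k)).mp hk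
      have hkne : k ≠ c := by
        have := (List.mem_filter.mp hkmem).2
        simpa using this
      rw [List.count_filter (by simpa using hkne), List.count_cons_of_ne hkne.symm]
    simp only [ccGo]
    rw [hrest, ih, hsame, hof, hmap]
    rfl

-- ===== VERDICT (by name: the statement is the Claim_ definition above) =====
theorem concepts_collections_spec : Claim_equal_concepts_collections := by
  intro concepts _
  unfold Spec_concepts_collections concepts_collections concepts_collections_alt
  rw [ccGo_eq]
  simp only [PySem.Dict.keys_counter, counter_values_eq, List.map_map]
  rfl
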